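-- pv_equiv track=rewrite | github.com/anasfaris/GoTap | frontend/features.py | search_suggestion
-- ===== SOURCE A (Python) =====
-- titles = ['computer engineering research group',
-- 		  'eecg student guide',
-- 		  'computer group online thesis library',
-- 		  'computer engineering group research facilities',
-- 		  'computer engineering group graduate students',
-- 		  'computer engineering group facility',
-- 		  'university of toronto',
-- 		  'recent news',
-- 		  'uoft campus map',
-- 		  'electrical & computer engineering',
-- 		  'electrical and computer engineering',
-- 		  'ece',
-- 		  'electrical engineering',
-- 		  'computer engineering',
-- 		  'undergraduates in ece',
-- 		  'alumni in uoft',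
-- 		  'research in uoft',
-- 		  'programs in uoft',
-- 		  'admission at uoft',
-- 		  'jianwen zhu',
-- 		  'tarek abdelrahman',
-- 		  'parham aarabi',
-- 		  'christiana amza',
-- 		  'ashvin goel',
-- 		  'farid najm',
-- 		  'computer science',
-- 		  'research facilities',
-- 		  'human computer interaction',
-- 		  'system software',
-- 		  'compilers',
-- 		  'computer architecture',
-- 		  'vlsi cad',
-- 		  'computer hardware',
-- 		  'technical reports',
-- 		  "how's the weather for today?",
-- 		  "do i need an umbrella",
-- 		  "what's the temperature outside",
-- 		  "2 ^ 2",
-- 		  "2 - 2",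
-- 		  "2 / 3",
-- 		  "define word",
-- 		  "define success",
-- 		  'computer']
--
-- def search_suggestion(phrase):
-- 	suggested = {}
-- 	for word in phrase.split():
-- 		for i, item in enumerate(titles):
-- 			if word in item.split():
-- 				if titles[i] != phrase:
-- 					if titles[i] not in suggested:
-- 						suggested[titles[i]] = 1
-- 					else:
-- 						suggested[titles[i]] += 1
--
-- 	suggested_ls =[]
-- 	#loop to get 20 keywords from history cache and store into recent_10 cache
-- 	for i, item in enumerate(sorted(suggested, key=suggested.get, reverse=True)):
-- 		if i > 3:
-- 			break
-- 		suggested_ls.append(item)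
--
-- 	return suggested_ls
-- ===== SOURCE B (Python) =====
-- titles = ['computer engineering research group',
-- 		  'eecg student guide',
-- 		  'computer group online thesis library',
-- 		  'computer engineering group research facilities',
-- 		  'computer engineering group graduate students',
-- 		  'computer engineering group facility',
-- 		  'university of toronto',
-- 		  'recent news',
-- 		  'uoft campus map',
-- 		  'electrical & computer engineering',
-- 		  'electrical and computer engineering',
-- 		  'ece',
-- 		  'electrical engineering',
-- 		  'computer engineering',
-- 		  'undergraduates in ece',
-- 		  'alumni in uoft',
-- 		  'research in uoft',
-- 		  'programs in uoft',
-- 		  'admission at uoft',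
-- 		  'jianwen zhu',
-- 		  'tarek abdelrahman',
-- 		  'parham aarabi',
-- 		  'christiana amza',
-- 		  'ashvin goel',
-- 		  'farid najm',
-- 		  'computer science',
-- 		  'research facilities',
-- 		  'human computer interaction',
-- 		  'system software',
-- 		  'compilers',
-- 		  'computer architecture',
-- 		  'vlsi cad',
-- 		  'computer hardware',
-- 		  'technical reports',
-- 		  "how's the weather for today?",
-- 		  "do i need an umbrella",
-- 		  "what's the temperature outside",
-- 		  "2 ^ 2",
-- 		  "2 - 2",
-- 		  "2 / 3",
-- 		  "define word",
-- 		  "define success",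
-- 		  'computer']
--
-- # inverted index: word -> titles (in title order) whose word list contains it,
-- # built once; dict.fromkeys dedups a title's words so each title is added once per word
-- _index = {}
-- for _t in titles:
-- 	for _w in dict.fromkeys(_t.split()):
-- 		_index[_w] = _index.get(_w, []) + [_t]
--
-- def search_suggestion(phrase):
-- 	suggested = {}
-- 	for word in phrase.split():
-- 		for title in _index.get(word, []):
-- 			if title != phrase:
-- 				suggested[title] = suggested.get(title, 0) + 1
-- 	return sorted(suggested, key=suggested.get, reverse=True)[:4]
-- ===== Notes on version B (the rewrite author's own statement) =====
-- stated objective: faster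
-- what changed: B precomputes an inverted index (word -> titles containing it, deduped per title) once at module level and, per phrase word, walks only the matching titles instead of re-splitting and scanning all 43 titles; the enumerate/break top-4 loop becomes a [:4] slice.
import Mathlib
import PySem

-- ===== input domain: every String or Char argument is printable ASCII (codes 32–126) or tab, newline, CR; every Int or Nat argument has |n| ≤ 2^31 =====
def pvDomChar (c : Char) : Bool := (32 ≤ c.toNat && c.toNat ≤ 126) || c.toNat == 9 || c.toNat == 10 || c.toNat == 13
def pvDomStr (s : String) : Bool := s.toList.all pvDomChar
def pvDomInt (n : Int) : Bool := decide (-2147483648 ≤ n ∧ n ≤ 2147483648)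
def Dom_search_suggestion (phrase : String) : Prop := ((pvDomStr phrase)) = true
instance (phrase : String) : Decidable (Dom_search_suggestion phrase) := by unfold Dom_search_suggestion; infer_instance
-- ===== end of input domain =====

-- B replaces A's per-word full scan over (and re-split of) all titles by one precomputed
-- inverted index word → matching titles, and replaces the enumerate/break top-4 loop by [:4].

-- module-level constant shared by both Pythons
def titlesL : List String :=
  ["computer engineering research group",
   "eecg student guide",
   "computer group online thesis library",
   "computer engineering group research facilities",
   "computer engineering group graduate students",
   "computer engineering group facility",
   "university of toronto",
   "recent news",
   "uoft campus map",
   "electrical & computer engineering",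
   "electrical and computer engineering",
   "ece",
   "electrical engineering",
   "computer engineering",
   "undergraduates in ece",
   "alumni in uoft",
   "research in uoft",
   "programs in uoft",
   "admission at uoft",
   "jianwen zhu",
   "tarek abdelrahman",
   "parham aarabi",
   "christiana amza",
   "ashvin goel",
   "farid najm",
   "computer science",
   "research facilities",
   "human computer interaction",
   "system software",
   "compilers",
   "computer architecture",
   "vlsi cad",
   "computer hardware",
   "technical reports",
   "how's the weather for today?",
   "do i need an umbrella",
   "what's the temperature outside",
   "2 ^ 2",
   "2 - 2",
   "2 / 3",
   "define word",
   "define success",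
   "computer"]


-- ===== PORT A =====
-- A's 'suggested' dict, built by the nested word/title loops
def suggestDictA (phrase : String) : PySem.Dict String Int :=
  (PySem.Str.split₀ phrase).foldl (fun d word =>
    (PySem.List.enumerate titlesL 0).foldl (fun d p =>
      -- p = (i, item); titles[i] is always in range here, so pyGetD is exact
      if (PySem.Str.split₀ p.2).contains word then
        if PySem.List.pyGetD titlesL p.1 "" ≠ phrase then
          if ¬ (d.contains (PySem.List.pyGetD titlesL p.1 "")) then
            d.insert (PySem.List.pyGetD titlesL p.1 "") 1
          else
            d.insert (PySem.List.pyGetD titlesL p.1 "") (d.getD (PySem.List.pyGetD titlesL p.1 "") 0 + 1)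
        else d
      else d) d) PySem.Dict.empty

-- A's final loop: 'for i, item in enumerate(...): if i > 3: break; suggested_ls.append(item)'
def searchLoopA : List (Int × String) → List String → List String
  | [], acc => acc
  | (i, item) :: rest, acc => if i > 3 then acc else searchLoopA rest (acc ++ [item])

def search_suggestion (phrase : String) : List String :=
  searchLoopA
    (PySem.List.enumerate
      (PySem.List.sorted (suggestDictA phrase).keys (fun k => (suggestDictA phrase).getD k 0) true) 0)
    []

-- ===== PORT B =====
-- inverted index built once over the titles; dict.fromkeys dedups a title's words (PySem.List.dedup)
def invIndex : PySem.Dict String (List String) :=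
  titlesL.foldl (fun d t =>
    (PySem.List.dedup (PySem.Str.split₀ t)).foldl (fun d w =>
      d.modify w [] (fun l => l ++ [t])) d) PySem.Dict.empty

-- B's 'suggested' dict, via index lookups
def suggestDictB (phrase : String) : PySem.Dict String Int :=
  (PySem.Str.split₀ phrase).foldl (fun d word =>
    (invIndex.getD word []).foldl (fun d title =>
      if title ≠ phrase then d.insert title (d.getD title 0 + 1) else d) d) PySem.Dict.empty

def search_suggestion_alt (phrase : String) : List String :=
  PySem.List.slice
    (PySem.List.sorted (suggestDictB phrase).keys (fun k => (suggestDictB phrase).getD k 0) true)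
    none (some 4)

-- ===== PRECONDITION & SPEC =====
def Spec_search_suggestion (phrase : String) (out : List String) : Prop := out = search_suggestion_alt phrase
instance (phrase : String) (out : List String) : Decidable (Spec_search_suggestion phrase out) := by unfold Spec_search_suggestion; infer_instance

-- ===== CLAIM (what is proved, stated in full; the proofs are below) =====
def Claim_equal_search_suggestion : Prop := ∀ (phrase : String), Dom_search_suggestion phrase → Spec_search_suggestion phrase (search_suggestion phrase)


-- ===== LEMMAS AND PROOFS =====

-- A's enumerate/break loop collects the first four elements
theorem searchLoopA_take (ls : List String) : ∀ (s : Nat) (acc : List String),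
    searchLoopA (PySem.List.enumerate ls (s : Int)) acc = acc ++ ls.take (4 - s) := by
  induction ls with
  | nil => intro s acc; simp [PySem.List.enumerate_nil, searchLoopA]
  | cons x xs ih =>
    intro s acc
    rw [PySem.List.enumerate_cons, searchLoopA]
    by_cases h : 4 ≤ s
    · have h3 : (s : Int) > 3 := by omega
      simp [h3, Nat.sub_eq_zero_of_le h]
    · have h3 : ¬ ((s : Int) > 3) := by omega
      have hcast : ((s : Int) + 1) = ((s + 1 : Nat) : Int) := by push_cast; ring
      rw [if_neg h3, hcast, ih (s + 1) (acc ++ [x])]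
      have h4 : 4 - s = (4 - (s + 1)) + 1 := by omega
      simp [h4, List.take_succ_cons]

theorem searchLoopA_take4 (ls : List String) :
    searchLoopA (PySem.List.enumerate ls 0) [] = ls.take 4 := by
  simpa using searchLoopA_take ls 0 []

-- one title's (deduped) word loop, seen through getD
theorem addWords_getD (t : String) : ∀ (ws : List String), ws.Nodup →
    ∀ (d : PySem.Dict String (List String)) (w : String),
    (ws.foldl (fun d u => d.modify u [] (fun l => l ++ [t])) d).getD w [] =
      if w ∈ ws then d.getD w [] ++ [t] else d.getD w [] := by
  intro ws
  induction ws with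
  | nil => intro _ d w; simp
  | cons u us ih =>
    intro hnd d w
    have hu : u ∉ us := (List.nodup_cons.mp hnd).1
    rw [List.foldl_cons, ih (List.nodup_cons.mp hnd).2]
    by_cases hw : w = u
    · subst hw
      simp [hu]
    · by_cases hws : w ∈ us <;>
        simp [hws, hw, PySem.Dict.getD_modify, List.mem_cons]

-- the whole index build, seen through getD
theorem buildIndex_getD : ∀ (ts : List String) (d : PySem.Dict String (List String)) (w : String),
    (ts.foldl (fun d t =>
        (PySem.List.dedup (PySem.Str.split₀ t)).foldl (fun d u =>
          d.modify u [] (fun l => l ++ [t])) d) d).getD w [] =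
      d.getD w [] ++ ts.filter (fun t => (PySem.Str.split₀ t).contains w) := by
  intro ts
  induction ts with
  | nil => intro d w; simp
  | cons t ts ih =>
    intro d w
    rw [List.foldl_cons, ih]
    rw [addWords_getD t _ (PySem.List.nodup_dedup _) d w]
    by_cases hm : w ∈ PySem.Str.split₀ t
    · have hc : (PySem.Str.split₀ t).contains w = true := by simpa using hm
      simp [hm, hc]
    · have hc : ¬ ((PySem.Str.split₀ t).contains w = true) := by simpa using hm
      simp [hm, hc]

-- the index lookup for one word is exactly A's scan of the titles for that word
theorem invIndex_getD (w : String) :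
    invIndex.getD w [] = titlesL.filter (fun t => (PySem.Str.split₀ t).contains w) := by
  rw [invIndex, buildIndex_getD titlesL PySem.Dict.empty w]
  simp

-- A's bump (insert-1 / += 1) is B's single upsert
theorem bump_eq (d : PySem.Dict String Int) (t : String) :
    (if ¬ (d.contains t) then d.insert t 1 else d.insert t (d.getD t 0 + 1)) =
      d.insert t (d.getD t 0 + 1) := by
  by_cases h : d.contains t = true
  · simp [h]
  · have h0 : d.getD t 0 = 0 :=
      PySem.Dict.getD_of_not_contains d 0 (by simpa using h)
    simp [h, h0]

-- pyGetD at an enumerate index is the enumerated element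
theorem pyGetD_enumerate (xs : List String) (p : Int × String)
    (hp : p ∈ PySem.List.enumerate xs 0) : PySem.List.pyGetD xs p.1 "" = p.2 := by
  rcases (PySem.List.mem_enumerate_iff xs 0 p).mp hp with ⟨k, hk, rfl⟩
  simp [PySem.List.pyGetD_natCast, List.getElem?_eq_getElem hk]

-- the per-word step of A equals the per-word step of B
theorem word_step_eq (phrase word : String) (d : PySem.Dict String Int) :
    (PySem.List.enumerate titlesL 0).foldl (fun d p =>
        if (PySem.Str.split₀ p.2).contains word then
          if PySem.List.pyGetD titlesL p.1 "" ≠ phrase then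
            if ¬ (d.contains (PySem.List.pyGetD titlesL p.1 "")) then
              d.insert (PySem.List.pyGetD titlesL p.1 "") 1
            else
              d.insert (PySem.List.pyGetD titlesL p.1 "") (d.getD (PySem.List.pyGetD titlesL p.1 "") 0 + 1)
          else d
        else d) d =
    (invIndex.getD word []).foldl (fun d title =>
        if title ≠ phrase then d.insert title (d.getD title 0 + 1) else d) d := by
  have hswap : List.foldl (fun (d : PySem.Dict String Int) (p : Int × String) =>
        if (PySem.Str.split₀ p.2).contains word then
          if p.2 ≠ phrase then d.insert p.2 (d.getD p.2 0 + 1) else d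
        else d) d (PySem.List.enumerate titlesL 0) =
      List.foldl (fun (d : PySem.Dict String Int) (t : String) =>
        if (PySem.Str.split₀ t).contains word then
          if t ≠ phrase then d.insert t (d.getD t 0 + 1) else d
        else d) d titlesL := by
    conv_rhs => rw [← PySem.List.map_snd_enumerate titlesL 0]
    rw [List.foldl_map]
  rw [PySem.List.foldl_congr_mem _ _
        (fun (d : PySem.Dict String Int) (p : Int × String) =>
          if (PySem.Str.split₀ p.2).contains word then
            if p.2 ≠ phrase then d.insert p.2 (d.getD p.2 0 + 1) else d
          else d) d
        (by
          intro acc p hp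
          rw [pyGetD_enumerate titlesL p hp]
          beta_reduce
          by_cases h1 : (PySem.Str.split₀ p.2).contains word = true
          · rw [if_pos h1, if_pos h1]
            by_cases h2 : p.2 ≠ phrase
            · rw [if_pos h2, if_pos h2]
              exact bump_eq acc p.2
            · rw [if_neg h2, if_neg h2]
          · rw [if_neg h1, if_neg h1])]
  rw [hswap, invIndex_getD word, List.foldl_filter]

-- the two 'suggested' dicts coincide (same keys, same counts, same insertion order)
theorem suggestDict_eq (phrase : String) : suggestDictA phrase = suggestDictB phrase := by
  unfold suggestDictA suggestDictB
  apply PySem.List.foldl_congr_mem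
  intro acc word _
  exact word_step_eq phrase word acc

-- ===== VERDICT (by name: the statement is the Claim_ definition above) =====
theorem search_suggestion_spec : Claim_equal_search_suggestion := by
  intro phrase _
  unfold Spec_search_suggestion search_suggestion search_suggestion_alt
  rw [suggestDict_eq phrase, searchLoopA_take4, PySem.List.slice_to _ (by norm_num)]
  rfl
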